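-- pv_equiv track=rewrite | github.com/dielfrag13/snippets | python/design/robot_vacuum_project/rooms.py | checkerboard_room
-- ===== SOURCE A (Python) =====
-- from typing import Dict, List, Optional, Tuple
--
-- Grid = List[List[str]]
--
-- def empty_room(rows: int, cols: int, border: bool = True) -> Grid:
--     """Create an empty room (all open floor) with optional walls on border.
--
--     Args:
--         rows, cols: dimensions (>=3 recommended)
--         border: whether to put '#' around the perimeter
--     """
--     if rows <= 0 or cols <= 0:
--         raise ValueError("rows and cols must be > 0")
--
--     grid: Grid = [["." for _ in range(cols)] for _ in range(rows)]
--     if border and rows >= 2 and cols >= 2: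
--         for c in range(cols):
--             grid[0][c] = "#"
--             grid[rows - 1][c] = "#"
--         for r in range(rows):
--             grid[r][0] = "#"
--             grid[r][cols - 1] = "#"
--     return grid
--
-- def checkerboard_room(rows: int, cols: int) -> Grid:
--     """Create a room with a checkerboard pattern of open and small obstacles.
--
--     Useful for testing coverage in constrained obstacle fields.
--     """
--     grid = empty_room(rows, cols, border=True)
--     for r in range(1, rows - 1):
--         for c in range(1, cols - 1):
--             if (r + c) % 2 == 0:
--                 grid[r][c] = "X"
--             else:
--                 grid[r][c] = "."
--     return grid
-- ===== SOURCE B (Python) =====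
-- def checkerboard_room(rows, cols):
--     """Checkerboard room built in one coordinate-driven pass."""
--     if rows <= 0 or cols <= 0:
--         raise ValueError("rows and cols must be > 0")
--     bordered = rows >= 2 and cols >= 2
--     return [
--         [
--             "#" if bordered and (r == 0 or r == rows - 1 or c == 0 or c == cols - 1)
--             else ("X" if 1 <= r <= rows - 2 and 1 <= c <= cols - 2 and (r + c) % 2 == 0 else ".")
--             for c in range(cols)
--         ]
--         for r in range(rows)
--     ]
-- ===== Notes on version B (the rewrite author's own statement) =====
-- stated objective: simpler
-- what changed: Replaces the three-phase build (allocate all-dot grid via empty_room, overwrite the border in two loops, overwrite the interior in a nested loop) by a single nested comprehension that computes each cell directly from its coordinates.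
import Mathlib
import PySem

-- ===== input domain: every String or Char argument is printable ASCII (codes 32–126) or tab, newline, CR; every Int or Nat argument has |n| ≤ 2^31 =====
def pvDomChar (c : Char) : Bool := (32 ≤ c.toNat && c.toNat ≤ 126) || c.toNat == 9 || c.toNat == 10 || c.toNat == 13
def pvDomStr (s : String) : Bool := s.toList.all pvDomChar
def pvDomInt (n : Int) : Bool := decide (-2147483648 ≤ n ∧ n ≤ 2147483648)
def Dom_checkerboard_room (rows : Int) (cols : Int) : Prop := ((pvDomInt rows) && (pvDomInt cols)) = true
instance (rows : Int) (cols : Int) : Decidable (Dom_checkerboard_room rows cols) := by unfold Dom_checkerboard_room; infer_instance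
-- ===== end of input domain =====

-- B replaces A's three-phase build (all-dot grid, border overwrite loops, interior overwrite loop)
-- by one nested comprehension computing each cell from its coordinates; objective: simpler.

-- ===== PORT A =====
-- grid[r][c] = v  (indices here are always nonnegative and in range in A)
def pvSetCell (g : List (List String)) (r c : Nat) (v : String) : List (List String) :=
  g.modify r (fun row => row.set c v)

def pv_empty_room (rows cols : Int) (border : Bool) : List (List String) :=
  let grid : List (List String) :=
    (PySem.List.pyRange 0 rows 1).map (fun _ => (PySem.List.pyRange 0 cols 1).map (fun _ => "."))
  if border = true ∧ 2 ≤ rows ∧ 2 ≤ cols then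
    let grid := (PySem.List.pyRange 0 cols 1).foldl
      (fun g c => pvSetCell (pvSetCell g 0 c.toNat "#") (rows - 1).toNat c.toNat "#") grid
    (PySem.List.pyRange 0 rows 1).foldl
      (fun g r => pvSetCell (pvSetCell g r.toNat 0 "#") r.toNat (cols - 1).toNat "#") grid
  else grid

def checkerboard_room (rows : Int) (cols : Int) : List (List String) :=
  let grid := pv_empty_room rows cols true
  (PySem.List.pyRange 1 (rows - 1) 1).foldl
    (fun g r => (PySem.List.pyRange 1 (cols - 1) 1).foldl
      (fun g c =>
        if PySem.Int.mod (r + c) 2 = 0 then pvSetCell g r.toNat c.toNat "X"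
        else pvSetCell g r.toNat c.toNat ".") g) grid

-- ===== PORT B =====
def checkerboard_room_alt (rows : Int) (cols : Int) : List (List String) :=
  let bordered := 2 ≤ rows ∧ 2 ≤ cols
  (PySem.List.pyRange 0 rows 1).map (fun r =>
    (PySem.List.pyRange 0 cols 1).map (fun c =>
      if bordered ∧ (r = 0 ∨ r = rows - 1 ∨ c = 0 ∨ c = cols - 1) then "#"
      else if 1 ≤ r ∧ r ≤ rows - 2 ∧ 1 ≤ c ∧ c ≤ cols - 2 ∧ PySem.Int.mod (r + c) 2 = 0 then "X"
      else "."))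

-- ===== PRECONDITION & SPEC =====
-- A raises ValueError when rows <= 0 or cols <= 0; those inputs are excluded.
def Pre_checkerboard_room (rows : Int) (cols : Int) : Prop := 1 ≤ rows ∧ 1 ≤ cols
instance (rows : Int) (cols : Int) : Decidable (Pre_checkerboard_room rows cols) := by
  unfold Pre_checkerboard_room; infer_instance
def pvWitness_checkerboard_room : Int × Int := (5, 4)

def Spec_checkerboard_room (rows : Int) (cols : Int) (out : List (List String)) : Prop := out = checkerboard_room_alt rows cols
instance (rows : Int) (cols : Int) (out : List (List String)) : Decidable (Spec_checkerboard_room rows cols out) := by unfold Spec_checkerboard_room; infer_instance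

-- ===== CLAIM (what is proved, stated in full; the proofs are below) =====
def Claim_equal_checkerboard_room : Prop := ∀ (rows : Int) (cols : Int), Dom_checkerboard_room rows cols → Pre_checkerboard_room rows cols → Spec_checkerboard_room rows cols (checkerboard_room rows cols)


-- ===== LEMMAS AND PROOFS =====

theorem pv_modify_id' {α : Type} (l : List α) (n : Nat) : l.modify n (fun x => x) = l :=
  List.modify_id n l

theorem pv_foldl_modify_fixed {α β : Type} (l : List β) (r : Nat) (F : β → List α → List α)
    (g : List (List α)) :
    l.foldl (fun g i => g.modify r (F i)) g
      = g.modify r (fun row => l.foldl (fun row i => F i row) row) := by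
  induction l generalizing g with
  | nil => simp [pv_modify_id']
  | cons i t ih =>
      simp only [List.foldl_cons, ih, List.modify_modify_eq]
      rfl

theorem pv_foldl_modify_two {α β : Type} (l : List β) (r1 r2 : Nat) (h : r1 ≠ r2)
    (F1 F2 : β → List α → List α) (g : List (List α)) :
    l.foldl (fun g i => (g.modify r1 (F1 i)).modify r2 (F2 i)) g
      = (g.modify r1 (fun row => l.foldl (fun row i => F1 i row) row)).modify r2
          (fun row => l.foldl (fun row i => F2 i row) row) := by
  induction l generalizing g with
  | nil => simp [pv_modify_id']
  | cons i t ih =>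
      simp only [List.foldl_cons, ih]
      apply List.ext_getElem?
      intro k
      simp only [List.getElem?_modify]
      by_cases h1 : r1 = k <;> by_cases h2 : r2 = k <;> cases g[k]? <;> simp_all

theorem pv_getElem?_foldl_range_modify {α : Type} (n a : Nat) (F : Nat → α → α) (g : List α)
    (j : Nat) :
    ((List.range n).foldl (fun g k => g.modify (a + k) (F k)) g)[j]?
      = if a ≤ j ∧ j < a + n then (g[j]?).map (F (j - a)) else g[j]? := by
  induction n with
  | zero => rw [if_neg (by omega)]; simp
  | succ n ih =>
      rw [List.range_succ, List.foldl_append, List.foldl_cons, List.foldl_nil,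
          List.getElem?_modify, ih]
      by_cases hj : a + n = j
      · rw [if_neg (by omega), if_pos (by omega), hj]
        cases g[j]? <;> simp [show j - a = n by omega]
      · by_cases hj2 : a ≤ j ∧ j < a + n
        · rw [if_pos hj2, if_pos (by omega)]
          cases g[j]? <;> simp [hj]
        · rw [if_neg hj2, if_neg (by omega)]
          cases g[j]? <;> simp [hj]

theorem pv_getElem?_foldl_range_modify0 {α : Type} (n : Nat) (F : Nat → α → α) (g : List α)
    (j : Nat) :
    ((List.range n).foldl (fun g k => g.modify k (F k)) g)[j]?
      = if j < n then (g[j]?).map (F j) else g[j]? := by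
  have h := pv_getElem?_foldl_range_modify n 0 F g j
  simp only [Nat.zero_add, Nat.sub_zero, Nat.zero_le, true_and] at h
  exact h

theorem pv_getElem?_foldl_range_set {α : Type} (n a : Nat) (v : Nat → α) (row : List α)
    (j : Nat) :
    ((List.range n).foldl (fun row k => row.set (a + k) (v k)) row)[j]?
      = if a ≤ j ∧ j < a + n then (row[j]?).map (fun _ => v (j - a)) else row[j]? := by
  have hlen : ∀ (nn : Nat) (r : List α),
      ((List.range nn).foldl (fun row k => row.set (a + k) (v k)) r).length
        = r.length := by
    intro nn
    induction nn with
    | zero => intro r; simp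
    | succ nn ihh =>
        intro r
        rw [List.range_succ, List.foldl_append, List.foldl_cons, List.foldl_nil,
            List.length_set, ihh]
  induction n with
  | zero => rw [if_neg (by omega)]; simp
  | succ n ih =>
      rw [List.range_succ, List.foldl_append, List.foldl_cons, List.foldl_nil,
          List.getElem?_set, ih, hlen n row]
      by_cases hj : a + n = j
      · subst hj
        rcases hrow : row[a + n]? with _ | x
        · have hge : row.length ≤ a + n := List.getElem?_eq_none_iff.mp hrow
          simp only [Option.map_none]
          split_ifs <;> first | rfl | omega
        · have hlt : a + n < row.length := (List.getElem?_eq_some_iff.mp hrow).1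
          simp only [Option.map_some]
          split_ifs <;> simp [show a + n - a = n by omega] <;> omega
      · rw [if_neg hj]
        by_cases h2 : a ≤ j ∧ j < a + n
        · rw [if_pos h2, if_pos (by omega)]
        · rw [if_neg h2, if_neg (by omega)]

theorem pv_getElem?_foldl_range_set0 {α : Type} (n : Nat) (v : Nat → α) (row : List α)
    (j : Nat) :
    ((List.range n).foldl (fun row k => row.set k (v k)) row)[j]?
      = if j < n then (row[j]?).map (fun _ => v j) else row[j]? := by
  have h := pv_getElem?_foldl_range_set n 0 v row j
  simp only [Nat.zero_add, Nat.sub_zero, Nat.zero_le, true_and] at h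
  exact h

theorem pv_length_foldl_set {α : Type} (nn a : Nat) (v : Nat → α) (r : List α) :
    ((List.range nn).foldl (fun row k => row.set (a + k) (v k)) r).length = r.length := by
  induction nn generalizing r with
  | zero => simp
  | succ nn ih =>
      rw [List.range_succ, List.foldl_append, List.foldl_cons, List.foldl_nil,
          List.length_set, ih]

theorem pv_length_foldl_set0 {α : Type} (nn : Nat) (v : Nat → α) (r : List α) :
    ((List.range nn).foldl (fun row k => row.set k (v k)) r).length = r.length := by
  induction nn generalizing r with
  | zero => simp
  | succ nn ih =>
      rw [List.range_succ, List.foldl_append, List.foldl_cons, List.foldl_nil,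
          List.length_set, ih]

theorem pv_foldl_const {α β : Type} (l : List β) (g : α) : l.foldl (fun g _ => g) g = g := by
  induction l <;> simp_all

theorem pv_mod_two (a : Int) : PySem.Int.mod a 2 = a % 2 := by
  simp [PySem.Int.mod, Int.fmod_eq_emod]

theorem pv_ite_modify_set {α : Type} (c : Prop) [Decidable c] (g : List (List α)) (r i : Nat)
    (v w : α) :
    (if c then g.modify r (fun row => row.set i v) else g.modify r (fun row => row.set i w))
      = g.modify r (fun row => row.set i (if c then v else w)) := by
  split <;> rfl

theorem checkerboard_room_main (rows cols : Int) (hr : 1 ≤ rows) (hc : 1 ≤ cols) :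
    checkerboard_room rows cols = checkerboard_room_alt rows cols := by
  lift rows to Nat using (by omega) with n
  lift cols to Nat using (by omega) with m
  have hn : 1 ≤ n := by exact_mod_cast hr
  have hm : 1 ≤ m := by exact_mod_cast hc
  unfold checkerboard_room checkerboard_room_alt pv_empty_room
  simp only [pv_mod_two,
    PySem.List.pyRange_one, List.foldl_map, List.map_map, pvSetCell,
    show ((n:Int) - 0).toNat = n from by omega,
    show ((m:Int) - 0).toNat = m from by omega,
    show ∀ k : Nat, ((0:Int) + (k:Int)).toNat = k from by intro k; omega,
    show ((n:Int) - 1 - 1).toNat = n - 2 from by omega,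
    show ((m:Int) - 1 - 1).toNat = m - 2 from by omega,
    show ((n:Int) - 1).toNat = n - 1 from by omega,
    show ((m:Int) - 1).toNat = m - 1 from by omega,
    show ∀ k : Nat, ((1:Int) + (k:Int)).toNat = 1 + k from by intro k; omega]
  simp only [pv_ite_modify_set, pv_foldl_modify_fixed, List.modify_modify_eq]
  by_cases hbig : 2 ≤ n ∧ 2 ≤ m
  · rw [if_pos ⟨trivial, by exact_mod_cast hbig.1, by exact_mod_cast hbig.2⟩]
    rw [pv_foldl_modify_two _ 0 (n-1) (by omega)]
    apply List.ext_getElem?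
    intro j
    rw [pv_getElem?_foldl_range_modify (n-2) 1 _ _ j]
    rw [pv_getElem?_foldl_range_modify0 n _ _ j]
    rw [List.getElem?_modify, List.getElem?_modify]
    simp only [List.getElem?_map, Function.comp]
    by_cases hj : j < n
    · rw [List.getElem?_range hj]
      simp only [Option.map_eq_map, Option.map_some, Option.map_map, Function.comp]
      by_cases hck : 1 ≤ j ∧ j < 1 + (n - 2) <;>
        [rw [if_pos hck, if_pos hj]; rw [if_neg hck, if_pos hj]] <;>
      simp only [Option.map_eq_map, Option.map_some, Option.map_map, Function.comp,
        Option.some.injEq] <;>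
      split_ifs <;>
      (apply List.ext_getElem?
       intro i
       by_cases hi : i < m
       · simp only [pv_getElem?_foldl_range_set, pv_getElem?_foldl_range_set0,
           List.getElem?_set, List.getElem?_map, List.getElem?_range hi, Option.map_some,
           Function.comp, Option.some.injEq,
           pv_length_foldl_set, pv_length_foldl_set0, List.length_set, List.length_map,
           List.length_range]
         split_ifs <;> first | rfl | omega
       · have hnone : (List.range m)[i]? = none := by simp; omega
         simp only [pv_getElem?_foldl_range_set, pv_getElem?_foldl_range_set0,
           List.getElem?_set, List.getElem?_map, hnone, Option.map_none,
           Function.comp, Option.some.injEq,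
           pv_length_foldl_set, pv_length_foldl_set0, List.length_set, List.length_map,
           List.length_range]
         split_ifs <;> first | rfl | omega)
    · rw [List.getElem?_eq_none (by simp; omega)]
      simp only [Option.map_none]
      split_ifs <;> rfl
  · have h1 : n = 1 ∨ m = 1 := by
      by_contra hcon
      push_neg at hcon
      exact hbig ⟨by omega, by omega⟩
    rw [if_neg (fun h => hbig ⟨by exact_mod_cast h.2.1, by exact_mod_cast h.2.2⟩)]
    have hsmall : ¬((2:Int) ≤ (n:Int) ∧ (2:Int) ≤ (m:Int)) :=
      fun h => hbig ⟨by exact_mod_cast h.1, by exact_mod_cast h.2⟩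
    rcases h1 with h1 | h1
    · rw [show n - 2 = 0 from by omega]
      simp only [List.range_zero, List.foldl_nil]
      apply List.ext_getElem?
      intro j
      simp only [List.getElem?_map, Function.comp]
      by_cases hj : j < n
      · rw [List.getElem?_range hj]
        simp only [Option.map_some, Option.some.injEq, Function.comp]
        apply List.ext_getElem?
        intro i
        simp only [Function.comp, List.getElem?_map]
        by_cases hi : i < m
        · rw [List.getElem?_range hi]
          simp only [Option.map_some, Option.some.injEq, Function.comp]
          rw [if_neg (fun h => hsmall h.1), if_neg (by omega)]
        · have hnone : (List.range m)[i]? = none := by simp; omega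
          rw [hnone]
          simp
      · have hnone : (List.range n)[j]? = none := by simp; omega
        rw [hnone]
        simp
    · rw [show m - 2 = 0 from by omega]
      simp only [List.range_zero, List.foldl_nil, pv_modify_id', pv_foldl_const]
      apply List.ext_getElem?
      intro j
      simp only [List.getElem?_map, Function.comp]
      by_cases hj : j < n
      · rw [List.getElem?_range hj]
        simp only [Option.map_some, Option.some.injEq, Function.comp]
        apply List.ext_getElem?
        intro i
        simp only [Function.comp, List.getElem?_map]
        by_cases hi : i < m
        · rw [List.getElem?_range hi]
          simp only [Option.map_some, Option.some.injEq, Function.comp]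
          rw [if_neg (fun h => hsmall h.1), if_neg (by omega)]
        · have hnone : (List.range m)[i]? = none := by simp; omega
          rw [hnone]
          simp
      · have hnone : (List.range n)[j]? = none := by simp; omega
        rw [hnone]
        simp

-- ===== VERDICT (by name: the statement is the Claim_ definition above) =====
theorem checkerboard_room_spec : Claim_equal_checkerboard_room := by
  intro rows cols _ hpre
  exact checkerboard_room_main rows cols hpre.1 hpre.2
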